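-- pv_equiv track=rewrite | github.com/CosminEugenDinu/snippets | Python-snippets/digit_str.py | digit_str
-- ===== SOURCE A (Python) =====
-- def digit_str(num, max_digits):
--     digits = [0 for _ in range(max_digits)]
--
--     digit = 0
--     k_digit = max_digits
--     while k_digit:
--         exp = max_digits-k_digit+1
--         base = 10
--         pow = 1
--         while exp:
--             pow *= base
--             exp -= 1
--         digit = (num % pow - digit)//(pow//10)
--         digits[k_digit-1] = digit
--
--         k_digit -= 1
--
--     return ''.join(str(d) for d in digits)
-- ===== SOURCE B (Python) =====
-- def digit_str(num, max_digits):
--     out = []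
--     n = num
--     for _ in range(max_digits):
--         out.append(str(n % 10))
--         n //= 10
--     return ''.join(reversed(out))
-- ===== Notes on version B (the rewrite author's own statement) =====
-- stated objective: faster
-- what changed: B extracts digits by repeatedly taking n % 10 and floor-dividing the running quotient by 10, then joins the reversed digit list (O(max_digits)), instead of A's per-position recomputation of 10**k by an inner while loop and the (num % 10**k - previous_digit) // 10**(k-1) recurrence (O(max_digits^2)).
-- crash fix: On max_digits < 0 A raises IndexError (digits[k_digit-1] on the empty list) while B's range loop runs zero times and returns ''. — e.g. on digit_str(5, -1): A raises IndexError, B returns ""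
import Mathlib
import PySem

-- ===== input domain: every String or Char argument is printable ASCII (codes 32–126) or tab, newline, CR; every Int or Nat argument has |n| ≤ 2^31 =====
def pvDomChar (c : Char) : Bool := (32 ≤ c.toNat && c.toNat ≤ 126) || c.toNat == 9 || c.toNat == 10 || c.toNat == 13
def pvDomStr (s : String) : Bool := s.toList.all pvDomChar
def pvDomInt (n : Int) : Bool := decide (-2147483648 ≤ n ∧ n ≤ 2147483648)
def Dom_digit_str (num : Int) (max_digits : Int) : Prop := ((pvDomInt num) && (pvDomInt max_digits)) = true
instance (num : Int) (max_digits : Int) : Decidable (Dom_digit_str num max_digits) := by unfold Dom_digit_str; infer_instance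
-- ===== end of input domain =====

-- B extracts digits with a single n % 10 / n //= 10 loop instead of A's per-position
-- power-of-ten inner loop and subtraction recurrence; equivalence is proved for max_digits ≥ 0
-- (A raises IndexError for negative max_digits).

-- ===== PORT A =====
-- inner 'while exp: pow *= base; exp -= 1'; counter is exp.toNat (exact, since exp ≥ 1 whenever
-- the loop runs under Pre_)
def digit_str_pow : Nat → Int → Int
  | 0, pow => pow
  | Nat.succ e, pow => digit_str_pow e (pow * 10)

-- outer 'while k_digit:' counted down; counter is k_digit.toNat (exact for max_digits ≥ 0, the
-- inputs admitted by Pre_); 'digits[k_digit-1] = digit' is List.set at index k_digit-1, in range there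
def digit_str_loop (num max_digits : Int) : Nat → Int → List Int → List Int
  | 0, _, digits => digits
  | Nat.succ n, digit, digits =>
    let exp : Int := max_digits - ((n : Int) + 1) + 1
    let pow := digit_str_pow exp.toNat 1
    let digit' := PySem.Int.floordiv (PySem.Int.mod num pow - digit) (PySem.Int.floordiv pow 10)
    digit_str_loop num max_digits n digit' (digits.set n digit')

def digit_str (num : Int) (max_digits : Int) : String :=
  -- digits = [0 for _ in range(max_digits)]
  let digits := List.replicate max_digits.toNat (0 : Int)
  let digits := digit_str_loop num max_digits max_digits.toNat 0 digits
  PySem.Str.join "" (digits.map PySem.Int.toStr)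

-- ===== PORT B =====
-- 'for _ in range(max_digits): out.append(str(n % 10)); n //= 10'
def digit_str_alt_loop : Nat → Int → List String → List String
  | 0, _, out => out
  | Nat.succ t, n, out =>
    digit_str_alt_loop t (PySem.Int.floordiv n 10) (out ++ [PySem.Int.toStr (PySem.Int.mod n 10)])

def digit_str_alt (num : Int) (max_digits : Int) : String :=
  PySem.Str.join "" (digit_str_alt_loop max_digits.toNat num []).reverse

-- ===== PRECONDITION & SPEC =====
-- Pre_ excludes exactly max_digits < 0, where Python A raises IndexError (digits[k_digit-1] on the empty list)
def Pre_digit_str (num : Int) (max_digits : Int) : Prop := 0 ≤ max_digits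
instance (num : Int) (max_digits : Int) : Decidable (Pre_digit_str num max_digits) := by unfold Pre_digit_str; infer_instance
def pvWitness_digit_str : Int × Int := (907, 4)

-- On max_digits < 0 A raises IndexError while B's range loop runs zero times and returns ''.
def Raises_digit_str (num : Int) (max_digits : Int) : Prop := max_digits < 0
instance (num : Int) (max_digits : Int) : Decidable (Raises_digit_str num max_digits) := by unfold Raises_digit_str; infer_instance
def pvRaiseWitness_digit_str : Int × Int := (5, -1)
def pvRaiseWitnessOut_digit_str : String := ""

def Spec_digit_str (num : Int) (max_digits : Int) (out : String) : Prop := out = digit_str_alt num max_digits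
instance (num : Int) (max_digits : Int) (out : String) : Decidable (Spec_digit_str num max_digits out) := by unfold Spec_digit_str; infer_instance

-- ===== CLAIM (what is proved, stated in full; the proofs are below) =====
def Claim_equal_digit_str : Prop := ∀ (num : Int) (max_digits : Int), Dom_digit_str num max_digits → Pre_digit_str num max_digits → Spec_digit_str num max_digits (digit_str num max_digits)
def Claim_raises_digit_str : Prop := (∀ (num : Int) (max_digits : Int), Dom_digit_str num max_digits → Raises_digit_str num max_digits → ¬ Pre_digit_str num max_digits) ∧ (Dom_digit_str (pvRaiseWitness_digit_str.1) (pvRaiseWitness_digit_str.2) ∧ Raises_digit_str (pvRaiseWitness_digit_str.1) (pvRaiseWitness_digit_str.2) ∧ digit_str_alt (pvRaiseWitness_digit_str.1) (pvRaiseWitness_digit_str.2) = pvRaiseWitnessOut_digit_str)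

-- ===== LEMMAS AND PROOFS =====

-- the e-th decimal digit (Python semantics; divisors positive, so ediv/emod)
def pvDig (a : Int) (e : Nat) : Int := (a / (10 : Int) ^ e) % 10

theorem pvPow_eq (e : Nat) (p : Int) : digit_str_pow e p = p * 10 ^ e := by
  induction e generalizing p with
  | zero => simp [digit_str_pow]
  | succ e ih => simp [digit_str_pow, ih, pow_succ]; ring

theorem pvI2 (a b c : Int) (hb : 0 < b) (hc : 0 < c) :
    (a % (b * c)) / b = (a / b) % c := by
  have hbc : (0:Int) < b * c := mul_pos hb hc
  have h1 : a % (b * c) = a - b * (c * (a / (b * c))) := by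
    rw [Int.emod_def]; ring
  rw [h1, sub_eq_add_neg, ← mul_neg, Int.add_mul_ediv_left _ _ (ne_of_gt hb),
      Int.emod_def, Int.ediv_ediv_of_nonneg (le_of_lt hb)]
  ring

theorem pvP2 (a : Int) (e : Nat) :
    (a % (10 : Int) ^ (e + 1) - (if e = 0 then 0 else pvDig a (e - 1))) / (10 : Int) ^ e
      = pvDig a e := by
  cases e with
  | zero => simp [pvDig]
  | succ e' =>
    have hp : (0:Int) < 10 ^ e' := by positivity
    have hP : (0:Int) < 10 ^ (e' + 1) := by positivity
    set P : Int := 10 ^ (e' + 1) with hPdef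
    -- prev = (a % P) / 10^e'
    have hprev : pvDig a e' = (a % P) / 10 ^ e' := by
      rw [pvDig, ← pvI2 a (10 ^ e') 10 hp (by norm_num), hPdef, pow_succ]
    -- decomposition of a % (P*10)
    have hr : a % (10 : Int) ^ (e' + 1 + 1) = P * pvDig a (e' + 1) + a % P := by
      have h10 : (10 : Int) ^ (e' + 1 + 1) = P * 10 := by rw [hPdef, pow_succ]
      rw [h10]
      have h1 : (a % (P * 10)) / P = (a / P) % 10 := pvI2 a P 10 hP (by norm_num)
      have h2 : (a % (P * 10)) % P = a % P :=
        Int.emod_emod_of_dvd a ⟨10, by ring⟩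
      have h3 := Int.ediv_add_emod (a % (P * 10)) P
      rw [h1, h2] at h3
      rw [← h3, pvDig]
    have hR0 : 0 ≤ a % P := Int.emod_nonneg a (ne_of_gt hP)
    have hRP : a % P < P := Int.emod_lt_of_pos a hP
    -- 0 ≤ prev ≤ a % P
    have hprev0 : 0 ≤ (a % P) / 10 ^ e' := Int.ediv_nonneg hR0 (le_of_lt hp)
    have hprevle : (a % P) / 10 ^ e' ≤ a % P := by
      calc (a % P) / 10 ^ e' ≤ (a % P) / 10 ^ e' * 10 ^ e' :=
            le_mul_of_one_le_right hprev0 hp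
        _ ≤ a % P := Int.ediv_mul_le _ (ne_of_gt hp)
    simp only [Nat.succ_ne_zero, if_false, Nat.add_sub_cancel, hprev, hr]
    have hsplit : P * pvDig a (e' + 1) + a % P - (a % P) / 10 ^ e'
        = (a % P - (a % P) / 10 ^ e') + P * pvDig a (e' + 1) := by ring
    rw [hsplit, Int.add_mul_ediv_left _ _ (ne_of_gt hP),
        Int.ediv_eq_zero_of_lt (by omega) (by omega), zero_add]

-- B's loop produces the digits of its running value in order
theorem pvB_loop (t : Nat) (n : Int) (out : List String) :
    digit_str_alt_loop t n out
      = out ++ (List.range t).map (fun j => PySem.Int.toStr (pvDig n j)) := by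
  induction t generalizing n out with
  | zero => simp [digit_str_alt_loop]
  | succ t ih =>
    rw [digit_str_alt_loop, ih, List.range_succ_eq_map]
    have hfd : PySem.Int.floordiv n 10 = n / 10 :=
      PySem.Int.floordiv_eq_ediv_of_pos (by norm_num)
    have hmd : PySem.Int.mod n 10 = n % 10 :=
      PySem.Int.mod_eq_emod_of_pos (by norm_num)
    have hdig : ∀ j : Nat, pvDig (n / 10) j = pvDig n (j + 1) := by
      intro j
      rw [pvDig, pvDig, Int.ediv_ediv_of_nonneg (by norm_num : (0:Int) ≤ 10), pow_succ]
      ring_nf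
    simp [pvDig, List.map_map, Function.comp]
    intro a _
    simpa [pvDig] using congrArg PySem.Int.toStr (hdig a)

-- A's loop: counting n down from m', it fills indices n-1 … 0 with the digits m'-n … m'-1
theorem pvA_loop (num : Int) (m' : Nat) (n : Nat) (d : Int) (L : List Int)
    (hn : n ≤ m') (hL : L.length = m')
    (hd : d = if n = m' then 0 else pvDig num (m' - n - 1)) :
    digit_str_loop num (m' : Int) n d L
      = (List.range n).map (fun j => pvDig num (m' - 1 - j)) ++ L.drop n := by
  induction n generalizing d L with
  | zero => simp [digit_str_loop]
  | succ n ih =>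
    rw [digit_str_loop]
    have hexp : ((m' : Int) - ((n : Int) + 1) + 1).toNat = m' - n := by omega
    have hmn : 1 ≤ m' - n := by omega
    set e : Nat := m' - n - 1 with he
    have hse : m' - n = e + 1 := by omega
    have hpow : digit_str_pow ((m' : Int) - ((n : Int) + 1) + 1).toNat 1 = (10 : Int) ^ (e + 1) := by
      rw [hexp, hse, pvPow_eq, one_mul]
    have hpow10 : PySem.Int.floordiv ((10 : Int) ^ (e + 1)) 10 = (10 : Int) ^ e := by
      rw [PySem.Int.floordiv_eq_ediv_of_pos (by norm_num), pow_succ,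
        Int.mul_ediv_cancel _ (by norm_num)]
    have hmodp : PySem.Int.mod num ((10 : Int) ^ (e + 1)) = num % (10 : Int) ^ (e + 1) :=
      PySem.Int.mod_eq_emod_of_pos (by positivity)
    have hdprev : d = (if e = 0 then 0 else pvDig num (e - 1)) := by
      rcases Nat.eq_or_lt_of_le hn with h | h
      · have : e = 0 := by omega
        simp [hd, h, this]
      · have h1 : ¬ (n + 1 = m') := by omega
        have h2 : ¬ (e = 0) := by omega
        have h3 : m' - (n + 1) - 1 = e - 1 := by omega
        simp [hd, h1, h2, h3]
    have hdig' : PySem.Int.floordiv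
        (PySem.Int.mod num (digit_str_pow ((m' : Int) - ((n : Int) + 1) + 1).toNat 1) - d)
        (PySem.Int.floordiv (digit_str_pow ((m' : Int) - ((n : Int) + 1) + 1).toNat 1) 10)
        = pvDig num e := by
      rw [hpow, hpow10, hmodp, PySem.Int.floordiv_eq_ediv_of_pos (by positivity), hdprev]
      exact pvP2 num e
    rw [hdig']
    have hlt : n < L.length := by omega
    have hdrop : (L.set n (pvDig num e)).drop n = pvDig num e :: L.drop (n + 1) := by
      rw [List.drop_eq_getElem_cons (by simpa using hlt)]
      congr 1
      · simp
      · exact List.drop_set_of_lt (by omega)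
    rw [ih (pvDig num e) (L.set n (pvDig num e)) (by omega) (by simpa using hL)
        (by have h1 : ¬ (n = m') := by omega
            simp [h1, he]),
      hdrop, List.range_succ, List.map_append]
    have h4 : m' - 1 - n = e := by omega
    simp [h4]

-- the two digit lists coincide up to reversal
theorem pvLists_eq (num : Int) (m' : Nat) :
    ((List.range m').map (fun j => pvDig num (m' - 1 - j))).map PySem.Int.toStr
      = ((List.range m').map (fun j => PySem.Int.toStr (pvDig num j))).reverse := by
  apply List.ext_getElem
  · simp
  · intro i h1 h2
    simp only [List.getElem_map, List.getElem_range, List.getElem_reverse]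
    simp only [List.length_map, List.length_range] at h1 h2 ⊢

-- ===== VERDICT (by name: the statement is the Claim_ definition above) =====
theorem digit_str_spec : Claim_equal_digit_str := by
  intro num max_digits _ hpre
  unfold Spec_digit_str digit_str digit_str_alt
  set m' : Nat := max_digits.toNat with hm'
  have hcast : max_digits = (m' : Int) := by
    unfold Pre_digit_str at hpre; omega
  show PySem.Str.join "" ((digit_str_loop num max_digits max_digits.toNat 0
        (List.replicate max_digits.toNat 0)).map PySem.Int.toStr)
      = PySem.Str.join "" (digit_str_alt_loop max_digits.toNat num []).reverse
  rw [hcast]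
  simp only [Int.toNat_natCast]
  rw [pvA_loop num m' m' 0 (List.replicate m' 0) (le_refl _) (by simp) (by simp)]
  rw [pvB_loop m' num []]
  simp only [List.drop_replicate, Nat.sub_self, List.replicate_zero, List.append_nil,
    List.nil_append]
  rw [pvLists_eq]

theorem digit_str_raises : Claim_raises_digit_str := by
  unfold Claim_raises_digit_str
  constructor
  · intro num max_digits _ hr hp
    unfold Raises_digit_str at hr; unfold Pre_digit_str at hp; omega
  · refine ⟨by decide, by decide, by decide⟩

-- self-check: at the raise witness (5, -1), where Python A raises IndexError, B's port returns ""
theorem digit_str_raises_witness_ok :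
    digit_str_alt pvRaiseWitness_digit_str.1 pvRaiseWitness_digit_str.2 = pvRaiseWitnessOut_digit_str :=
  digit_str_raises.2.2.2
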